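-- pv_equiv track=rewrite | github.com/embeddings-benchmark/mteb | mteb/abstasks/_statistics_calculation.py | _count_samples_in_train
-- ===== SOURCE A (Python) =====
-- def _count_samples_in_train(
--     test_hashes: dict[str, list[str]],
--     train_hashes: dict[str, list[str]] | None,
-- ) -> int | None:
--     """Count unique test samples (by row-tuple hash) that also appear in the train split.
--
--     Args:
--         test_hashes: Per-modality hash lists for the test split (from :func:`_compute_modality_hashes`).
--         train_hashes: Per-modality hash lists for the train split, or ``None`` when
--             the evaluated split *is* the train split.
--
--     Returns:
--         Number of unique test row-tuples present in train, or ``None``.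
--     """
--     if train_hashes is None:
--         return None
--     mods = sorted(test_hashes.keys())
--     n_test = len(test_hashes[mods[0]])
--     n_train = len(train_hashes[mods[0]])
--     test_keys = {tuple(test_hashes[m][i] for m in mods) for i in range(n_test)}
--     train_keys = {tuple(train_hashes[m][i] for m in mods) for i in range(n_train)}
--     return len(test_keys & train_keys)
-- ===== SOURCE B (Python) =====
-- def _count_samples_in_train(
--     test_hashes: dict[str, list[str]],
--     train_hashes: dict[str, list[str]] | None,
-- ) -> int | None:
--     """Sort both splits' row tuples and count distinct common rows by a two-pointer merge.
--
--     No hash sets at all: each split's row tuples are sorted, and one merge pass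
--     walks both sorted lists, counting a value once and skipping its duplicate
--     block in each list whenever the fronts coincide.
--     """
--     if train_hashes is None:
--         return None
--     mods = sorted(test_hashes.keys())
--     a = sorted(tuple(test_hashes[m][i] for m in mods)
--                for i in range(len(test_hashes[mods[0]])))
--     b = sorted(tuple(train_hashes[m][j] for m in mods)
--                for j in range(len(train_hashes[mods[0]])))
--     count = 0
--     i = j = 0
--     while i < len(a) and j < len(b):
--         if a[i] < b[j]:
--             i += 1
--         elif b[j] < a[i]:
--             j += 1
--         else:
--             k = a[i]
--             count += 1
--             while i < len(a) and a[i] == k: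
--                 i += 1
--             while j < len(b) and b[j] == k:
--                 j += 1
--     return count
-- ===== Notes on version B (the rewrite author's own statement) =====
-- stated objective: alternative
-- what changed: A hashes the row tuples of both splits into two sets and returns the size of their intersection; B uses no sets at all: it sorts both splits' row-tuple lists and counts distinct common rows in one two-pointer merge pass that skips duplicate blocks.
import Mathlib
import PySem

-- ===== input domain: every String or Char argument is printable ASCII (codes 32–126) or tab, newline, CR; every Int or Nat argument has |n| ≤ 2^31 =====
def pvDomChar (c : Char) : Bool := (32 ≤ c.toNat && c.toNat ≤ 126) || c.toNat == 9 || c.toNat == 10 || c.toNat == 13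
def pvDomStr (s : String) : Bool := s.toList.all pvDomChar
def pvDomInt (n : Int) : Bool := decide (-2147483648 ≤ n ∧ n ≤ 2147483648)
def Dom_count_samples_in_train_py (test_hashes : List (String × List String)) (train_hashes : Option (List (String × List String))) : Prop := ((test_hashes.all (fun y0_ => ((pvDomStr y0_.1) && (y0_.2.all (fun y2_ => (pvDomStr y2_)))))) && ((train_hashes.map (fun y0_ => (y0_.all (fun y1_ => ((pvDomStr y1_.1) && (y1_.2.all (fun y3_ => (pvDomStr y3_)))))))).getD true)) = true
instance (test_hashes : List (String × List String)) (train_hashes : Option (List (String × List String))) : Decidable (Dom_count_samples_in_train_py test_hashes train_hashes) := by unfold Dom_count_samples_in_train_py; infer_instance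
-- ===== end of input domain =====

-- B replaces A's "hash both splits' row tuples into two sets and intersect" by a set-free
-- algorithm: sort both row-tuple lists and count distinct common rows in one two-pointer
-- merge pass (alternative algorithm, no speed claim).

-- ===== PORT A =====
def count_samples_in_train_py (test_hashes : List (String × List String)) (train_hashes : Option (List (String × List String))) : Option Int :=
  match train_hashes with
  | none => none
  | some th =>
    let td := PySem.Dict.ofList test_hashes
    let tr := PySem.Dict.ofList th
    -- sorted(test_hashes.keys()): Python string order = code-point order = List Char order
    let mods := PySem.List.sorted (PySem.Dict.keys td) (fun s => s.toList)
    match PySem.List.pyGet? mods 0 with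
    | none => none   -- IndexError on mods[0]; excluded by Pre_
    | some m0 =>
      match PySem.Dict.get? tr m0 with
      | none => none -- KeyError on train_hashes[mods[0]]; excluded by Pre_
      | some rl =>
        let n_test := (PySem.Dict.getD td m0 []).length
        let n_train := rl.length
        let test_keys : PySem.Set (List (Option String)) :=
          PySem.Set.ofList ((PySem.List.pyRange 0 (n_test : Int) 1).map
            (fun i => mods.map (fun m => PySem.List.pyGet? (PySem.Dict.getD td m []) i)))
        let train_keys : PySem.Set (List (Option String)) :=
          PySem.Set.ofList ((PySem.List.pyRange 0 (n_train : Int) 1).map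
            (fun i => mods.map (fun m => PySem.List.pyGet? (PySem.Dict.getD tr m []) i)))
        some (PySem.Set.len (PySem.Set.inter test_keys train_keys))

-- ===== PORT B =====
-- a row tuple of strings, as a List of code-point lists (Python tuple/str comparison = Lean List lex order)
def pvF (o : Option String) : List Char := (o.map String.toList).getD []

-- the two-pointer merge loop of Source B: state (i, j, count) kept as (suffix of a, suffix of b, count);
-- the inner duplicate-skipping 'while' loops are the dropWhile scans
def pvMergeCount : List (List (List Char)) → List (List (List Char)) → Int → Int
  | [], _, c => c
  | _ :: _, [], c => c
  | x :: xs, y :: ys, c =>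
    if x < y then pvMergeCount xs (y :: ys) c
    else if y < x then pvMergeCount (x :: xs) ys c
    else pvMergeCount (xs.dropWhile (fun r => r == x)) (ys.dropWhile (fun r => r == x)) (c + 1)
  termination_by a b _ => a.length + b.length
  decreasing_by
  · simp
  · simp
  · have h1 := List.length_dropWhile_le (fun r => r == x) xs
    have h2 := List.length_dropWhile_le (fun r => r == x) ys
    simp; omega

def count_samples_in_train_py_alt (test_hashes : List (String × List String)) (train_hashes : Option (List (String × List String))) : Option Int :=
  match train_hashes with
  | none => none
  | some th =>
    let td := PySem.Dict.ofList test_hashes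
    let tr := PySem.Dict.ofList th
    let mods := PySem.List.sorted (PySem.Dict.keys td) (fun s => s.toList)
    match PySem.List.pyGet? mods 0 with
    | none => none   -- IndexError on mods[0]; excluded by Pre_
    | some m0 =>
      match PySem.Dict.get? tr m0 with
      | none => none -- KeyError on train_hashes[mods[0]]; excluded by Pre_
      | some rl =>
        let a := PySem.List.sorted ((PySem.List.pyRange 0 (((PySem.Dict.getD td m0 []).length : Nat) : Int) 1).map
          (fun i => mods.map (fun m => pvF (PySem.List.pyGet? (PySem.Dict.getD td m []) i)))) (fun r => r)
        let b := PySem.List.sorted ((PySem.List.pyRange 0 ((rl.length : Nat) : Int) 1).map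
          (fun j => mods.map (fun m => pvF (PySem.List.pyGet? (PySem.Dict.getD tr m []) j)))) (fun r => r)
        some (pvMergeCount a b 0)

-- ===== PRECONDITION & SPEC =====
-- Pre_ excludes exactly the inputs on which the Python A raises: an empty test dict
-- (IndexError on mods[0]), a test/train modality list too short for the indexing range
-- (IndexError), or a modality key missing from train while it is actually looked up (KeyError).
def pvPreSome (test_hashes : List (String × List String)) (th : List (String × List String)) : Bool :=
  let td := PySem.Dict.ofList test_hashes
  let tr := PySem.Dict.ofList th
  let m0 := (PySem.List.sorted (PySem.Dict.keys td) (fun s => s.toList)).headD ""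
  decide (test_hashes ≠ []) &&
  PySem.Dict.contains tr m0 &&
  (PySem.Dict.keys td).all (fun m => decide ((PySem.Dict.getD td m0 []).length ≤ (PySem.Dict.getD td m []).length)) &&
  ((PySem.Dict.getD tr m0 []).length == 0 ||
    (PySem.Dict.keys td).all (fun m => PySem.Dict.contains tr m && decide ((PySem.Dict.getD tr m0 []).length ≤ (PySem.Dict.getD tr m []).length)))

def Pre_count_samples_in_train_py (test_hashes : List (String × List String)) (train_hashes : Option (List (String × List String))) : Prop :=
  (train_hashes.map (pvPreSome test_hashes)).getD true = true

instance (test_hashes : List (String × List String)) (train_hashes : Option (List (String × List String))) : Decidable (Pre_count_samples_in_train_py test_hashes train_hashes) := by unfold Pre_count_samples_in_train_py; infer_instance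

def pvWitness_count_samples_in_train_py : (List (String × List String)) × (Option (List (String × List String))) :=
  ([("a", ["x", "y"])], some [("a", ["y", "z"])])

def Spec_count_samples_in_train_py (test_hashes : List (String × List String)) (train_hashes : Option (List (String × List String))) (out : Option Int) : Prop := out = count_samples_in_train_py_alt test_hashes train_hashes
instance (test_hashes : List (String × List String)) (train_hashes : Option (List (String × List String))) (out : Option Int) : Decidable (Spec_count_samples_in_train_py test_hashes train_hashes out) := by unfold Spec_count_samples_in_train_py; infer_instance

-- ===== CLAIM (what is proved, stated in full; the proofs are below) =====
def Claim_equal_count_samples_in_train_py : Prop := ∀ (test_hashes : List (String × List String)) (train_hashes : Option (List (String × List String))), Dom_count_samples_in_train_py test_hashes train_hashes → Pre_count_samples_in_train_py test_hashes train_hashes → Spec_count_samples_in_train_py test_hashes train_hashes (count_samples_in_train_py test_hashes train_hashes)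

-- ===== LEMMAS AND PROOFS =====

-- A's set-intersection size, as a Finset cardinality
theorem pvInterLen {α : Type} [DecidableEq α] [BEq α] [LawfulBEq α] (ta tb : List α) :
    PySem.Set.len (PySem.Set.inter (PySem.Set.ofList ta) (PySem.Set.ofList tb))
      = ((ta.toFinset ∩ tb.toFinset).card : Int) := by
  have hnd : ((PySem.Set.ofList ta).filter (fun x => (PySem.Set.ofList tb).contains x)).Nodup :=
    (PySem.Set.nodup_ofList ta).filter _
  have hfs : ((PySem.Set.ofList ta).filter (fun x => (PySem.Set.ofList tb).contains x)).toFinset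
      = ta.toFinset ∩ tb.toFinset := by
    ext z
    simp [PySem.Set.mem_ofList]
  unfold PySem.Set.len PySem.Set.inter
  rw [← List.toFinset_card_of_nodup hnd, hfs]

-- a sorted list's dropWhile (== head) is its filter (≠ head)
theorem pvDropWhile_eq_filter (x : List (List Char)) :
    ∀ (l : List (List (List Char))), l.Pairwise (· ≤ ·) → (∀ z ∈ l, x ≤ z) →
      l.dropWhile (fun r => r == x) = l.filter (fun r => !(r == x)) := by
  intro l
  induction l with
  | nil => intro _ _; rfl
  | cons z t ih =>
    intro hp hge
    rcases List.pairwise_cons.mp hp with ⟨hz, ht⟩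
    by_cases hzx : z = x
    · subst hzx
      rw [List.dropWhile_cons_of_pos (by simp), List.filter_cons_of_neg (by simp)]
      exact ih ht hz
    · rw [List.dropWhile_cons_of_neg (by simp [hzx]), List.filter_cons_of_pos (by simp [hzx])]
      have hxz : x < z := lt_of_le_of_ne (hge z (by simp)) (Ne.symm hzx)
      rw [List.filter_eq_self.mpr]
      intro w hw
      have : z ≤ w := hz w hw
      simp only [Bool.not_eq_eq_eq_not, Bool.not_true, beq_eq_false_iff_ne]
      exact fun h => absurd (h ▸ this) (not_le.mpr hxz)

-- B's merge loop counts the distinct common values of two sorted lists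
theorem pvMergeCount_spec (a b : List (List (List Char))) (c : Int)
    (ha : a.Pairwise (· ≤ ·)) (hb : b.Pairwise (· ≤ ·)) :
    pvMergeCount a b c = c + ((a.toFinset ∩ b.toFinset).card : Int) := by
  fun_induction pvMergeCount a b c with
  | case1 b c => simp
  | case2 x xs c => simp
  | case3 x xs y ys c hlt ih =>
    rcases List.pairwise_cons.mp ha with ⟨hx, hxs⟩
    rcases List.pairwise_cons.mp hb with ⟨hy, hys⟩
    have hset : (x :: xs).toFinset ∩ (y :: ys).toFinset = xs.toFinset ∩ (y :: ys).toFinset := by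
      ext z
      simp only [List.toFinset_cons, Finset.mem_inter, Finset.mem_insert, List.mem_toFinset]
      constructor
      · rintro ⟨rfl | hz1, hz2⟩
        · rcases hz2 with rfl | hz2
          · exact absurd hlt (lt_irrefl z)
          · exact absurd (hy z hz2) (not_le.mpr hlt)
        · exact ⟨hz1, hz2⟩
      · rintro ⟨hz1, hz2⟩; exact ⟨Or.inr hz1, hz2⟩
    rw [ih hxs hb, hset]
  | case4 x xs y ys c hlt hgt ih =>
    rcases List.pairwise_cons.mp ha with ⟨hx, hxs⟩
    rcases List.pairwise_cons.mp hb with ⟨hy, hys⟩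
    have hset : (x :: xs).toFinset ∩ (y :: ys).toFinset = (x :: xs).toFinset ∩ ys.toFinset := by
      ext z
      simp only [List.toFinset_cons, Finset.mem_inter, Finset.mem_insert, List.mem_toFinset]
      constructor
      · rintro ⟨hz1, rfl | hz2⟩
        · rcases hz1 with rfl | hz1
          · exact absurd hgt (lt_irrefl z)
          · exact absurd (hx z hz1) (not_le.mpr hgt)
        · exact ⟨hz1, hz2⟩
      · rintro ⟨hz1, hz2⟩; exact ⟨hz1, Or.inr hz2⟩
    rw [ih ha hys, hset]
  | case5 x xs y ys c hlt hgt ih =>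
    have hxy : x = y := le_antisymm (not_lt.mp hgt) (not_lt.mp hlt)
    subst hxy
    rcases List.pairwise_cons.mp ha with ⟨hx, hxs⟩
    rcases List.pairwise_cons.mp hb with ⟨hy, hys⟩
    have hda := pvDropWhile_eq_filter x xs hxs hx
    have hdb := pvDropWhile_eq_filter x ys hys hy
    have hpa : (xs.dropWhile (fun r => r == x)).Pairwise (· ≤ ·) :=
      List.Pairwise.sublist (List.dropWhile_sublist _) hxs
    have hpb : (ys.dropWhile (fun r => r == x)).Pairwise (· ≤ ·) :=
      List.Pairwise.sublist (List.dropWhile_sublist _) hys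
    rw [ih hpa hpb, hda, hdb]
    have hfa : (xs.filter (fun r => !(r == x))).toFinset = xs.toFinset.erase x := by
      ext z; simp [and_comm]
    have hfb : (ys.filter (fun r => !(r == x))).toFinset = ys.toFinset.erase x := by
      ext z; simp [and_comm]
    rw [hfa, hfb]
    have h1 : xs.toFinset.erase x ∩ ys.toFinset.erase x = (xs.toFinset ∩ ys.toFinset).erase x := by
      ext z; simp; tauto
    have h2 : (x :: xs).toFinset ∩ (x :: ys).toFinset = insert x (xs.toFinset ∩ ys.toFinset) := by
      ext z; simp; tauto
    rw [h1, h2]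
    have h3 : (insert x (xs.toFinset ∩ ys.toFinset)).card
        = ((xs.toFinset ∩ ys.toFinset).erase x).card + 1 := by
      rw [show insert x (xs.toFinset ∩ ys.toFinset)
            = insert x ((xs.toFinset ∩ ys.toFinset).erase x) by
          ext z; simp; tauto]
      rw [Finset.card_insert_of_notMem (Finset.notMem_erase x _)]
    rw [h3]
    push_cast
    ring

-- row tuples with no missing entry are injective under pvF
theorem pvMapPvFInj : ∀ (r1 r2 : List (Option String)),
    (∀ o ∈ r1, o ≠ none) → (∀ o ∈ r2, o ≠ none) → r1.map pvF = r2.map pvF → r1 = r2 := by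
  intro r1
  induction r1 with
  | nil => intro r2 _ _ h; cases r2 <;> simp_all
  | cons o1 t1 ih =>
    intro r2 h1 h2 h
    cases r2 with
    | nil => simp_all
    | cons o2 t2 =>
      simp only [List.map_cons, List.cons.injEq] at h
      have ht : t1 = t2 := ih t2 (fun o ho => h1 o (List.mem_cons_of_mem _ ho))
        (fun o ho => h2 o (List.mem_cons_of_mem _ ho)) h.2
      cases o1 with
      | none => exact absurd rfl (h1 none (List.mem_cons_self))
      | some s1 =>
        cases o2 with
        | none => exact absurd rfl (h2 none (List.mem_cons_self))
        | some s2 =>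
          have hs : s1.toList = s2.toList := h.1
          rw [ht, String.toList_inj.mp hs]

-- an injective relabelling does not change the size of a list-intersection
theorem pvCardMapInter {α β : Type} [DecidableEq α] [DecidableEq β] (f : α → β) (ta tb : List α)
    (hinj : Set.InjOn f (↑ta.toFinset ∪ ↑tb.toFinset)) :
    ((ta.map f).toFinset ∩ (tb.map f).toFinset).card = (ta.toFinset ∩ tb.toFinset).card := by
  have h1 : (ta.map f).toFinset = ta.toFinset.image f := by ext x; simp
  have h2 : (tb.map f).toFinset = tb.toFinset.image f := by ext x; simp
  rw [h1, h2, ← Finset.image_inter_of_injOn _ _ hinj,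
    Finset.card_image_of_injOn (hinj.mono (by intro x hx; simp at hx ⊢; tauto))]

-- keys of a dict literal are the deduped first components
theorem pvKeysOfList (l : List (String × List String)) :
    (PySem.Dict.ofList l).keys = PySem.Set.ofList (l.map Prod.fst) := by
  have h := PySem.Dict.keys_foldl_insert_key l Prod.fst (fun d x => x.2) PySem.Dict.empty
  simp [PySem.Dict.ofList, PySem.Dict.update] at h ⊢
  exact h

-- the port's `sorted` and the lemmas' `sorted` differ only in defeq order instances
theorem pvSortedEq (l : List (List (List Char))) :
    @PySem.List.sorted _ _ List.instLT (fun a b => a.decidableLT b) l (fun r => r) false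
      = @PySem.List.sorted _ _ List.instLinearOrder.toLT LinearOrder.toDecidableLT l (fun r => r) false := by
  congr 1

-- the whole equality, for arbitrary row lists whose entries are all present
theorem pvMain (ta tb : List (List (Option String)))
    (hNFa : ∀ r ∈ ta, ∀ o ∈ r, o ≠ none) (hNFb : ∀ r ∈ tb, ∀ o ∈ r, o ≠ none) :
    PySem.Set.len (PySem.Set.inter (PySem.Set.ofList ta) (PySem.Set.ofList tb))
      = pvMergeCount (PySem.List.sorted (ta.map (List.map pvF)) (fun r => r))
          (PySem.List.sorted (tb.map (List.map pvF)) (fun r => r)) 0 := by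
  have hinj : Set.InjOn (List.map pvF) (↑ta.toFinset ∪ ↑tb.toFinset) := by
    intro r1 hr1 r2 hr2 heq
    simp only [Set.mem_union, Finset.mem_coe, List.mem_toFinset] at hr1 hr2
    refine pvMapPvFInj r1 r2 ?_ ?_ heq
    · rcases hr1 with h | h
      exacts [hNFa r1 h, hNFb r1 h]
    · rcases hr2 with h | h
      exacts [hNFa r2 h, hNFb r2 h]
  rw [pvSortedEq (ta.map (List.map pvF)), pvSortedEq (tb.map (List.map pvF))]
  have hsa := PySem.List.sorted_pairwise (ta.map (List.map pvF)) (fun r => r)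
  have hsb := PySem.List.sorted_pairwise (tb.map (List.map pvF)) (fun r => r)
  have hpermA : (@PySem.List.sorted _ _ List.instLinearOrder.toLT LinearOrder.toDecidableLT
        (ta.map (List.map pvF)) (fun r => r) false).toFinset = (ta.map (List.map pvF)).toFinset :=
    List.toFinset_eq_of_perm _ _ (@PySem.List.sorted_perm _ _ _ LinearOrder.toDecidableLT _ _ _)
  have hpermB : (@PySem.List.sorted _ _ List.instLinearOrder.toLT LinearOrder.toDecidableLT
        (tb.map (List.map pvF)) (fun r => r) false).toFinset = (tb.map (List.map pvF)).toFinset :=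
    List.toFinset_eq_of_perm _ _ (@PySem.List.sorted_perm _ _ _ LinearOrder.toDecidableLT _ _ _)
  rw [pvMergeCount_spec _ _ 0 (by simpa using hsa) (by simpa using hsb),
    hpermA, hpermB, pvCardMapInter _ _ _ hinj, pvInterLen]
  ring

-- ===== VERDICT (by name: the statement is the Claim_ definition above) =====
theorem count_samples_in_train_py_spec : Claim_equal_count_samples_in_train_py := by
  intro test train hdom hpre
  show count_samples_in_train_py test train = count_samples_in_train_py_alt test train
  cases train with
  | none => rfl
  | some th =>
    simp only [Pre_count_samples_in_train_py, Option.map_some, Option.getD_some] at hpre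
    simp only [pvPreSome, Bool.and_eq_true, Bool.or_eq_true, decide_eq_true_eq,
      List.all_eq_true, beq_iff_eq] at hpre
    obtain ⟨⟨⟨hne, hcont⟩, htlen⟩, hrlen⟩ := hpre
    have hmodsne : (PySem.List.sorted (PySem.Dict.ofList test).keys (fun s => s.toList)) ≠ [] := by
      rw [Ne, PySem.List.sorted_eq_nil_iff, pvKeysOfList]
      cases test with
      | nil => exact absurd rfl hne
      | cons p pr =>
        intro hc
        have hp : p.1 ∈ PySem.Set.ofList ((p :: pr).map Prod.fst) :=
          (PySem.Set.mem_ofList _ _).mpr (by simp)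
        rw [hc] at hp
        simp at hp
    obtain ⟨m0, rest, hm⟩ : ∃ m0 rest,
        PySem.List.sorted (PySem.Dict.ofList test).keys (fun s => s.toList) = m0 :: rest := by
      cases h : PySem.List.sorted (PySem.Dict.ofList test).keys (fun s => s.toList) with
      | nil => exact absurd h hmodsne
      | cons a b => exact ⟨a, b, rfl⟩
    rw [hm] at hcont htlen hrlen
    simp only [List.headD_cons] at hcont htlen hrlen
    rw [PySem.Dict.contains_eq_isSome_get?] at hcont
    obtain ⟨rl, hrl⟩ := Option.isSome_iff_exists.mp hcont
    have hgd : (PySem.Dict.ofList th).getD m0 [] = rl := PySem.Dict.getD_of_get?_eq_some _ [] hrl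
    have hm0 : PySem.List.pyGet? (m0 :: rest) 0 = some m0 := by simp
    simp only [count_samples_in_train_py, count_samples_in_train_py_alt, hm, hm0, hrl]
    refine congrArg some ?_
    have hta : (List.map (fun i => List.map (fun m => pvF (PySem.List.pyGet? ((PySem.Dict.ofList test).getD m []) i)) (m0 :: rest)) (PySem.List.pyRange 0 ((((PySem.Dict.ofList test).getD m0 []).length : Nat) : Int)))
        = (List.map (fun i => List.map (fun m => PySem.List.pyGet? ((PySem.Dict.ofList test).getD m []) i) (m0 :: rest)) (PySem.List.pyRange 0 ((((PySem.Dict.ofList test).getD m0 []).length : Nat) : Int))).map (List.map pvF) := by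
      simp [List.map_map, Function.comp_def]
    have htb : (List.map (fun j => List.map (fun m => pvF (PySem.List.pyGet? ((PySem.Dict.ofList th).getD m []) j)) (m0 :: rest)) (PySem.List.pyRange 0 ((rl.length : Nat) : Int)))
        = (List.map (fun i => List.map (fun m => PySem.List.pyGet? ((PySem.Dict.ofList th).getD m []) i) (m0 :: rest)) (PySem.List.pyRange 0 ((rl.length : Nat) : Int))).map (List.map pvF) := by
      simp [List.map_map, Function.comp_def]
    rw [hta, htb]
    refine pvMain _ _ ?_ ?_
    · intro r hr o ho
      simp only [List.mem_map] at hr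
      obtain ⟨i, hi, rfl⟩ := hr
      simp only [List.mem_map] at ho
      obtain ⟨m, hmem, rfl⟩ := ho
      rw [← hm] at hmem
      have hmk : m ∈ (PySem.Dict.ofList test).keys := (PySem.List.mem_sorted _ _ _ _).mp hmem
      have hlen := htlen m hmk
      have hi' := PySem.List.mem_pyRange_one.mp hi
      rw [PySem.List.pyGet?_eq_some_getElem _ hi'.1 (by have := hi'.2; omega)]
      simp
    · intro r hr o ho
      simp only [List.mem_map] at hr
      obtain ⟨j, hj, rfl⟩ := hr
      simp only [List.mem_map] at ho
      obtain ⟨m, hmem, rfl⟩ := ho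
      rw [← hm] at hmem
      have hmk : m ∈ (PySem.Dict.ofList test).keys := (PySem.List.mem_sorted _ _ _ _).mp hmem
      have hj' := PySem.List.mem_pyRange_one.mp hj
      rcases hrlen with h0 | hall
      · rw [hgd] at h0
        exact absurd hj'.2 (by have := hj'.1; omega)
      · obtain ⟨hcm, hlm⟩ := hall m hmk
        rw [hgd] at hlm
        rw [PySem.List.pyGet?_eq_some_getElem _ hj'.1 (by have := hj'.2; omega)]
        simp
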